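-- pv_equiv track=rewrite | github.com/allchemy-net/yieldPrediction | loader.py | _getConditionChangesPos
-- ===== SOURCE A (Python) =====
-- def _getConditionChangesPos(conds, rxes):
--     changesPos = dict()
--     for poz, cnd in enumerate(conds[1:], 1):
--         if cnd != conds[poz-1]:
--             rxsmi, _ = rxes[poz-1]
--             _, target = rxsmi.split('>>')
--             if '.' in target:
--                 raise NotImplementedError
--             changesPos[poz-1] = target
--     return changesPos
-- ===== SOURCE B (Python) =====
-- def _getConditionChangesPos(conds, rxes):
--     # Group conds into runs of equal values, then walk the runs keeping a
--     # cumulative offset; each run after the first starts a change whose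
--     # recorded position is the last index of the previous run (offset-1).
--     runs = []
--     for c in conds:
--         if runs and runs[-1][0] == c:
--             runs[-1][1] += 1
--         else:
--             runs.append([c, 1])
--     changes = {}
--     offset = 0
--     first = True
--     for _, n in runs:
--         if not first:
--             rxsmi, _ = rxes[offset - 1]
--             _, target = rxsmi.split('>>')
--             if '.' in target:
--                 raise NotImplementedError
--             changes[offset - 1] = target
--         first = False
--         offset += n
--     return changes
-- ===== Notes on version B (the rewrite author's own statement) =====
-- stated objective: alternative
-- what changed: Replaces the adjacent-pair comparison loop with run-length grouping: conds is first compressed into runs of equal values, then a second pass over the runs records each change at cumulative-offset-1, the last index of the preceding run.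
import Mathlib
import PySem

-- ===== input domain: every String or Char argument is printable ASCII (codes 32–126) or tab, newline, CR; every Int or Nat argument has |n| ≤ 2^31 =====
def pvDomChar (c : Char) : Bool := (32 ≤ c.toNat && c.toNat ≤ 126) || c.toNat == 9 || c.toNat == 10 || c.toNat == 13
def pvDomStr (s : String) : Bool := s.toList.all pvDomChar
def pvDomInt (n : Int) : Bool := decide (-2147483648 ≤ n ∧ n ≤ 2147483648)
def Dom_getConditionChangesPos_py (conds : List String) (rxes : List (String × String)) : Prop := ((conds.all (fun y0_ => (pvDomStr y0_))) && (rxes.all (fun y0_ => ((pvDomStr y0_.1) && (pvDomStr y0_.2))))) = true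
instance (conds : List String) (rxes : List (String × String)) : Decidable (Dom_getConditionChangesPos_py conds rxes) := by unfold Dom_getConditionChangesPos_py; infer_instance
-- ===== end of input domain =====

-- B replaces A's adjacent-pair comparison with run-length grouping plus a cumulative
-- offset over the runs (an alternative decomposition of the same O(n) task).


-- ===== PORT A =====
-- the loop body of A ('none' = the iteration raised: IndexError / ValueError / NotImplementedError)
def stepA (conds : List String) (rxes : List (String × String))
    (st : Option (PySem.Dict Int String)) (pc : Int × String) : Option (PySem.Dict Int String) :=
  match st with
  | none => none
  | some d =>
    if pc.2 != PySem.List.pyGetD conds (pc.1 - 1) "" then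
      match PySem.List.pyGet? rxes (pc.1 - 1) with
      | none => none                                   -- rxes[poz-1]: IndexError
      | some rx =>
        match PySem.Str.split? rx.1 ">>" with          -- rxsmi.split('>>')
        | some [_, target] =>
          if PySem.Str.isIn "." target then none       -- raise NotImplementedError
          else some (d.insert (pc.1 - 1) target)       -- changesPos[poz-1] = target
        | _ => none                                    -- '_, target = …': ValueError
    else some d

def getConditionChangesPos_py (conds : List String) (rxes : List (String × String)) : List (Int × String) :=
  match (PySem.List.enumerate (PySem.List.slice conds (some 1) none) 1).foldl
      (stepA conds rxes) (some PySem.Dict.empty) with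
  | some d => d.items
  | none => []

-- ===== PORT B =====
-- runs-building loop body: 'if runs and runs[-1][0] == c: runs[-1][1] += 1 else: runs.append([c, 1])'
def runStep (runs : List (String × Int)) (c : String) : List (String × Int) :=
  match runs.getLast? with
  | some (c', n) => if c' == c then runs.dropLast ++ [(c', n + 1)] else runs ++ [(c, 1)]
  | none => runs ++ [(c, 1)]

-- second loop of B over the runs, carrying (offset, first, changes); 'none' = raised
def emitRuns (rxes : List (String × String)) :
    List (String × Int) → Int → Bool → Option (PySem.Dict Int String) → Option (PySem.Dict Int String)
  | [], _, _, st => st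
  | (_, n) :: rs, off, first, st =>
    emitRuns rxes rs (off + n) false
      (if first then st
       else
         match st with
         | none => none
         | some d =>
           match PySem.List.pyGet? rxes (off - 1) with
           | none => none
           | some rx =>
             match PySem.Str.split? rx.1 ">>" with
             | some [_, target] =>
               if PySem.Str.isIn "." target then none
               else some (d.insert (off - 1) target)
             | _ => none)

def getConditionChangesPos_py_alt (conds : List String) (rxes : List (String × String)) : List (Int × String) :=
  match emitRuns rxes (conds.foldl runStep []) 0 true (some PySem.Dict.empty) with
  | some d => d.items
  | none => []

-- ===== PRECONDITION & SPEC =====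
-- Pre_ excludes exactly the inputs on which the Python A raises: at some change position i
-- (conds[i+1] ≠ conds[i]) either i ≥ len(rxes) (IndexError), or rxes[i][0].split('>>') has
-- not exactly two parts (ValueError), or the target part contains '.' (NotImplementedError).
def Pre_getConditionChangesPos_py (conds : List String) (rxes : List (String × String)) : Prop :=
  ∀ i ∈ List.range (conds.length - 1),
    conds.getD (i + 1) "" ≠ conds.getD i "" →
      i < rxes.length ∧
      ((PySem.Str.split? (rxes.getD i ("", "")).1 ">>").getD []).length = 2 ∧
      PySem.Str.isIn "." (((PySem.Str.split? (rxes.getD i ("", "")).1 ">>").getD []).getD 1 "") = false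

instance (conds : List String) (rxes : List (String × String)) : Decidable (Pre_getConditionChangesPos_py conds rxes) := by
  unfold Pre_getConditionChangesPos_py; infer_instance

def pvWitness_getConditionChangesPos_py : List String × (List (String × String)) :=
  (["a", "b"], [("x>>y", "z")])

def Spec_getConditionChangesPos_py (conds : List String) (rxes : List (String × String)) (out : List (Int × String)) : Prop := out = getConditionChangesPos_py_alt conds rxes
instance (conds : List String) (rxes : List (String × String)) (out : List (Int × String)) : Decidable (Spec_getConditionChangesPos_py conds rxes out) := by unfold Spec_getConditionChangesPos_py; infer_instance

-- ===== CLAIM (what is proved, stated in full; the proofs are below) =====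
def Claim_equal_getConditionChangesPos_py : Prop := ∀ (conds : List String) (rxes : List (String × String)), Dom_getConditionChangesPos_py conds rxes → Pre_getConditionChangesPos_py conds rxes → Spec_getConditionChangesPos_py conds rxes (getConditionChangesPos_py conds rxes)

-- ===== LEMMAS AND PROOFS =====

-- the boundary action both loops perform at change position i (proof-side abbreviation)
def bStep (rxes : List (String × String)) (i : Int)
    (st : Option (PySem.Dict Int String)) : Option (PySem.Dict Int String) :=
  match st with
  | none => none
  | some d =>
    match PySem.List.pyGet? rxes i with
    | none => none
    | some rx =>
      match PySem.Str.split? rx.1 ">>" with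
      | some [_, target] =>
        if PySem.Str.isIn "." target then none
        else some (d.insert i target)
      | _ => none

-- A's loop, rephrased as structural recursion carrying (previous element, its index)
def specA (rxes : List (String × String)) (st : Option (PySem.Dict Int String))
    (i : Int) (prev : String) : List String → Option (PySem.Dict Int String)
  | [] => st
  | c :: cs => specA rxes (if c == prev then st else bStep rxes i st) (i + 1) c cs

-- cons-structured run-length encoding (what conds.foldl runStep [] computes)
def glue (p : String × Int) (rs : List (String × Int)) : List (String × Int) :=
  match rs with
  | (c', m) :: rest => if c' == p.1 then (p.1, p.2 + m) :: rest else p :: rs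
  | [] => [p]

def runsC : List String → List (String × Int)
  | [] => []
  | c :: cs => glue (c, 1) (runsC cs)

lemma glue_glue (c : String) (n m : Int) (rs : List (String × Int)) :
    glue (c, n) (glue (c, m) rs) = glue (c, n + m) rs := by
  cases rs with
  | nil => simp [glue]
  | cons p rest =>
    obtain ⟨c', k⟩ := p
    by_cases h : c' = c
    · subst h; simp [glue]; ring
    · simp [glue, h]

lemma glue_ne (c : String) (n : Int) (d : String) (k : Int) (rs : List (String × Int))
    (h : c ≠ d) : glue (c, n) (glue (d, k) rs) = (c, n) :: glue (d, k) rs := by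
  cases rs with
  | nil => simp [glue, Ne.symm h]
  | cons p rest =>
    obtain ⟨c', j⟩ := p
    by_cases h' : c' = d <;> simp [glue, h', Ne.symm h]

lemma foldl_runStep (cs : List String) :
    ∀ (pre : List (String × Int)) (c : String) (n : Int),
      cs.foldl runStep (pre ++ [(c, n)]) = pre ++ glue (c, n) (runsC cs) := by
  induction cs with
  | nil => intro pre c n; simp [runsC, glue]
  | cons d cs' ih =>
    intro pre c n
    by_cases h : c = d
    · subst h
      have hstep : runStep (pre ++ [(c, n)]) c = pre ++ [(c, n + 1)] := by
        simp [runStep]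
      calc List.foldl runStep (pre ++ [(c, n)]) (c :: cs')
          = List.foldl runStep (pre ++ [(c, n + 1)]) cs' := by rw [List.foldl_cons, hstep]
        _ = pre ++ glue (c, n + 1) (runsC cs') := ih pre c (n + 1)
        _ = pre ++ glue (c, n) (runsC (c :: cs')) := by
              rw [runsC, glue_glue]
    · have hstep : runStep (pre ++ [(c, n)]) d = (pre ++ [(c, n)]) ++ [(d, 1)] := by
        simp [runStep, h]
      calc List.foldl runStep (pre ++ [(c, n)]) (d :: cs')
          = List.foldl runStep ((pre ++ [(c, n)]) ++ [(d, 1)]) cs' := by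
              rw [List.foldl_cons, hstep]
        _ = (pre ++ [(c, n)]) ++ glue (d, 1) (runsC cs') := ih (pre ++ [(c, n)]) d 1
        _ = pre ++ glue (c, n) (runsC (d :: cs')) := by
              rw [runsC, glue_ne c n d 1 _ h]
              simp

lemma runs_eq (conds : List String) : conds.foldl runStep [] = runsC conds := by
  cases conds with
  | nil => rfl
  | cons c cs =>
    have h0 : runStep [] c = [] ++ [(c, 1)] := by simp [runStep]
    simp only [List.foldl_cons, h0]
    simpa [runsC] using foldl_runStep cs [] c 1

lemma runsC_cons_head (c : String) (cs : List String) :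
    ∃ m rest, runsC (c :: cs) = (c, m) :: rest := by
  show ∃ m rest, glue (c, 1) (runsC cs) = (c, m) :: rest
  cases h : runsC cs with
  | nil => exact ⟨1, [], by simp [glue]⟩
  | cons p rest =>
    obtain ⟨c', k⟩ := p
    by_cases h' : c' = c
    · exact ⟨1 + k, rest, by simp [glue, h']⟩
    · exact ⟨1, (c', k) :: rest, by simp [glue, h']⟩

lemma emitRuns_false_cons (rxes : List (String × String)) (c : String) (m : Int)
    (rest : List (String × Int)) (off : Int) (st : Option (PySem.Dict Int String)) :
    emitRuns rxes ((c, m) :: rest) off false st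
      = emitRuns rxes ((c, m) :: rest) off true (bStep rxes (off - 1) st) := by
  cases st <;> rfl

-- B's run walk equals A's element walk
lemma emit_eq_specA (rxes : List (String × String)) (cs : List String) :
    ∀ (prev : String) (i : Int) (st : Option (PySem.Dict Int String)),
      emitRuns rxes (runsC (prev :: cs)) i true st = specA rxes st i prev cs := by
  induction cs with
  | nil =>
    intro prev i st
    show emitRuns rxes (glue (prev, 1) (runsC [])) i true st = st
    simp [runsC, glue, emitRuns]
  | cons c cs' ih =>
    intro prev i st
    obtain ⟨m, rest, hr⟩ := runsC_cons_head c cs'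
    by_cases h : c = prev
    · subst h
      have h1 : runsC (c :: c :: cs') = (c, 1 + m) :: rest := by
        show glue (c, 1) (runsC (c :: cs')) = _
        rw [hr]; simp [glue]
      have h2 : specA rxes st i c (c :: cs') = specA rxes st (i + 1) c cs' := by
        simp [specA]
      rw [h1, h2, ← ih c (i + 1) st, hr]
      show emitRuns rxes rest (i + (1 + m)) false st = emitRuns rxes rest (i + 1 + m) false st
      congr 1
      ring
    · have h1 : runsC (prev :: c :: cs') = (prev, 1) :: (c, m) :: rest := by
        show glue (prev, 1) (runsC (c :: cs')) = _
        rw [hr]; simp [glue, h]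
      have h2 : specA rxes st i prev (c :: cs') = specA rxes (bStep rxes i st) (i + 1) c cs' := by
        simp [specA, h]
      have h3 : emitRuns rxes ((prev, 1) :: (c, m) :: rest) i true st
          = emitRuns rxes ((c, m) :: rest) (i + 1) false st := rfl
      have h4 := emitRuns_false_cons rxes c m rest (i + 1) st
      have hi : i + 1 - 1 = i := by ring
      rw [h1, h2, h3, h4, hi, ← ih c (i + 1) (bStep rxes i st), hr]

-- A's enumerate fold equals the element walk
lemma foldA_eq_specA (conds : List String) (rxes : List (String × String)) (cs : List String) :
    ∀ (k : Nat) (st : Option (PySem.Dict Int String)), conds.drop (k + 1) = cs →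
      (PySem.List.enumerate cs ((k : Int) + 1)).foldl (stepA conds rxes) st
        = specA rxes st (k : Int) (conds.getD k "") cs := by
  induction cs with
  | nil => intro k st _; simp [PySem.List.enumerate, specA]
  | cons c cs' ih =>
    intro k st hdrop
    have hget : conds.getD (k + 1) "" = c := by
      have h0 : conds[k + 1]? = (conds.drop (k + 1))[0]? := by
        rw [List.getElem?_drop]
      rw [hdrop] at h0
      simp at h0
      simp [List.getD, h0]
    have hdrop' : conds.drop (k + 1 + 1) = cs' := by
      have h5 : conds.drop (k + 1 + 1) = (conds.drop (k + 1)).drop 1 := by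
        rw [List.drop_drop]
      rw [h5, hdrop]; rfl
    rw [PySem.List.enumerate_cons, List.foldl_cons]
    have hstep : stepA conds rxes st ((k : Int) + 1, c)
        = if c == conds.getD k "" then st else bStep rxes (k : Int) st := by
      have hk : ((k : Int) + 1) - 1 = (k : Int) := by ring
      cases st with
      | none => cases hb : (c == conds.getD k "") <;> simp [stepA, bStep]
      | some d =>
        show (if c != PySem.List.pyGetD conds ((k : Int) + 1 - 1) "" then _ else _) = _
        rw [hk, PySem.List.pyGetD_natCast]
        by_cases hb : c = conds.getD k ""
        · simp [hb]
        · simp [bStep]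
    have hcast : ((k : Int) + 1) + 1 = ((k + 1 : Nat) : Int) + 1 := by push_cast; ring
    have hcast2 : ((k + 1 : Nat) : Int) = (k : Int) + 1 := by push_cast; ring
    rw [hstep, hcast, ih (k + 1) _ hdrop', hget, hcast2]
    rw [specA]

-- the two ports agree on ALL inputs (both encode a raise as 'none')
lemma ports_eq (conds : List String) (rxes : List (String × String)) :
    getConditionChangesPos_py conds rxes = getConditionChangesPos_py_alt conds rxes := by
  unfold getConditionChangesPos_py getConditionChangesPos_py_alt
  rw [PySem.List.slice_from conds (by norm_num : (0 : Int) ≤ 1), runs_eq]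
  cases conds with
  | nil => rfl
  | cons c cs =>
    have hA : (PySem.List.enumerate ((c :: cs).drop (1 : Int).toNat) 1).foldl
        (stepA (c :: cs) rxes) (some PySem.Dict.empty)
        = specA rxes (some PySem.Dict.empty) 0 c cs := by
      simpa using foldA_eq_specA (c :: cs) rxes cs 0 (some PySem.Dict.empty) rfl
    rw [hA, ← emit_eq_specA rxes cs c 0 (some PySem.Dict.empty)]

-- ===== VERDICT (by name: the statement is the Claim_ definition above) =====
theorem getConditionChangesPos_py_spec : Claim_equal_getConditionChangesPos_py := by
  intro conds rxes _ _
  show getConditionChangesPos_py conds rxes = getConditionChangesPos_py_alt conds rxes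
  exact ports_eq conds rxes
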